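-- pv_equiv track=rewrite | github.com/estrada0521/multiagent-chat | lib/agent_index/chat_runtime_parse_core.py | _pane_runtime_new_events
-- ===== SOURCE A (Python) =====
-- def _pane_runtime_new_events(previous: list[dict], current: list[dict]) -> list[dict]:
--     if not current:
--         return []
--     prev_ids = [str((item or {}).get("source_id") or "") for item in (previous or [])]
--     cur_ids = [str((item or {}).get("source_id") or "") for item in current]
--     max_overlap = min(len(prev_ids), len(cur_ids))
--     for overlap in range(max_overlap, 0, -1):
--         if prev_ids[-overlap:] == cur_ids[:overlap]:
--             return current[overlap:]
--     return [] if prev_ids == cur_ids else current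
-- ===== SOURCE B (Python) =====
-- def _pane_runtime_new_events(previous: list[dict], current: list[dict]) -> list[dict]:
--     if not current:
--         return []
--     prev_ids = [str((item or {}).get("source_id") or "") for item in (previous or [])]
--     cur_ids = [str((item or {}).get("source_id") or "") for item in current]
--     if not prev_ids:
--         return current
--     # KMP prefix function of cur_ids + sentinel + prev_ids; final value is the
--     # length of the longest suffix of prev_ids that is a prefix of cur_ids.
--     s = cur_ids + [None] + prev_ids
--     pi = [0] * len(s)
--     k = 0
--     for i in range(1, len(s)):
--         while k > 0 and s[i] != s[k]:
--             k = pi[k - 1]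
--         if s[i] == s[k]:
--             k += 1
--         pi[i] = k
--     return current[k:]
-- ===== Notes on version B (the rewrite author's own statement) =====
-- stated objective: alternative
-- what changed: Replaces A's try-every-overlap scan (slicing and comparing for each candidate length) with a single KMP prefix-function pass over cur_ids + [None] + prev_ids, whose final value is the longest suffix-of-prev/prefix-of-cur overlap.
import Mathlib
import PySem

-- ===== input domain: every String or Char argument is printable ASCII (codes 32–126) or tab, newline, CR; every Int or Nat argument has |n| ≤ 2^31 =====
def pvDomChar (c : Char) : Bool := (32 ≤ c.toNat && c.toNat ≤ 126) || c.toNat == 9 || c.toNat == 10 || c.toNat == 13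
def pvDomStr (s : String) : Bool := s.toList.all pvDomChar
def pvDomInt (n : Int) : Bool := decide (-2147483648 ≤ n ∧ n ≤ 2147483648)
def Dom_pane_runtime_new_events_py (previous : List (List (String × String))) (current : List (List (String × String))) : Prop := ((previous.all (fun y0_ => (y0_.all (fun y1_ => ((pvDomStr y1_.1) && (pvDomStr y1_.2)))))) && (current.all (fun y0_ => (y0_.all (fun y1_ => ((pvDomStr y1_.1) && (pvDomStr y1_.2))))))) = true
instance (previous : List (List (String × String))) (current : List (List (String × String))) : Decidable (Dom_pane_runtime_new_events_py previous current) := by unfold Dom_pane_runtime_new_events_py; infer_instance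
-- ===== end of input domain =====

-- B replaces A's try-every-overlap scan by a single KMP prefix-function pass over cur_ids + [None] + prev_ids (objective: alternative).

-- ===== PORT A =====
-- str((item or {}).get("source_id") or "")  (values are strings on this domain, so str(...) is the identity)
def pvId (item : List (String × String)) : String :=
  ((PySem.Dict.mk item).get? "source_id").getD ""

-- the 'for overlap in range(max_overlap, 0, -1)' loop with its early return
def aLoopA (prev_ids cur_ids : List String) (current : List (List (String × String))) :
    List Int → Option (List (List (String × String)))
  | [] => none
  | ov :: rest =>
    if PySem.List.slice prev_ids (some (-ov)) none = PySem.List.slice cur_ids none (some ov) then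
      some (PySem.List.slice current (some ov) none)
    else aLoopA prev_ids cur_ids current rest

def pane_runtime_new_events_py (previous : List (List (String × String))) (current : List (List (String × String))) : List (List (String × String)) :=
  if current = [] then []
  else
    let prev_ids := previous.map pvId   -- 'previous or []' is previous for a list
    let cur_ids := current.map pvId
    let max_overlap : Nat := min prev_ids.length cur_ids.length
    match aLoopA prev_ids cur_ids current (PySem.List.pyRange (max_overlap : Int) 0 (-1)) with
    | some r => r
    | none => if prev_ids = cur_ids then [] else current

-- ===== PORT B =====
-- 'while k > 0 and s[i] != s[k]: k = pi[k-1]'.  The index k is provably in range on every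
-- run (k = border length < i ≤ len s), so getD is exact; the 'else 0' branch is only a
-- termination guard (pi[k-1] < k always holds on real runs).
def kmpWhile (s : List (Option String)) (pi : List Nat) (c : Option String) (k : Nat) : Nat :=
  if 0 < k ∧ c ≠ s.getD k none then
    let k' := pi.getD (k - 1) 0
    if _h : k' < k then kmpWhile s pi c k' else 0
  else k
termination_by k

-- one iteration of 'for i in range(1, len(s))'
def kmpStep (s : List (Option String)) (st : List Nat × Nat) (i : Nat) : List Nat × Nat :=
  let c := s.getD i none
  let k1 := kmpWhile s st.1 c st.2
  let k2 := if c = s.getD k1 none then k1 + 1 else k1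
  (st.1.set i k2, k2)

def pane_runtime_new_events_py_alt (previous : List (List (String × String))) (current : List (List (String × String))) : List (List (String × String)) :=
  if current = [] then []
  else
    let prev_ids := previous.map pvId
    let cur_ids := current.map pvId
    if prev_ids = [] then current
    else
      -- s = cur_ids + [None] + prev_ids ; None is the sentinel
      let s : List (Option String) := cur_ids.map some ++ [none] ++ prev_ids.map some
      let st := (List.range' 1 (s.length - 1)).foldl (kmpStep s) (List.replicate s.length 0, 0)
      PySem.List.slice current (some (st.2 : Int)) none

-- ===== PRECONDITION & SPEC =====
def Spec_pane_runtime_new_events_py (previous : List (List (String × String))) (current : List (List (String × String))) (out : List (List (String × String))) : Prop := out = pane_runtime_new_events_py_alt previous current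
instance (previous : List (List (String × String))) (current : List (List (String × String))) (out : List (List (String × String))) : Decidable (Spec_pane_runtime_new_events_py previous current out) := by unfold Spec_pane_runtime_new_events_py; infer_instance

-- ===== CLAIM (what is proved, stated in full; the proofs are below) =====
def Claim_equal_pane_runtime_new_events_py : Prop := ∀ (previous : List (List (String × String))) (current : List (List (String × String))), Dom_pane_runtime_new_events_py previous current → Spec_pane_runtime_new_events_py previous current (pane_runtime_new_events_py previous current)

-- ===== LEMMAS AND PROOFS =====

-- 'suffix of length k of p equals prefix of length k of c'
abbrev pvOv {α : Type} [DecidableEq α] (p c : List α) (k : Nat) : Prop :=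
  p.drop (p.length - k) = c.take k

-- the longest such overlap length
def pvOvK {α : Type} [DecidableEq α] (p c : List α) : Nat :=
  Nat.findGreatest (pvOv p c) (min p.length c.length)

-- self-overlap (border) predicate and longest proper border
abbrev pvSP {α : Type} [DecidableEq α] (t : List α) (k : Nat) : Prop :=
  t.drop (t.length - k) = t.take k

def pvBord {α : Type} [DecidableEq α] (t : List α) : Nat :=
  Nat.findGreatest (pvSP t) (t.length - 1)

theorem pvOv_zero {α : Type} [DecidableEq α] (p c : List α) : pvOv p c 0 := by
  simp [pvOv]

theorem pvSP_zero {α : Type} [DecidableEq α] (t : List α) : pvSP t 0 := by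
  simp [pvSP]

theorem pvBord_lt {α : Type} [DecidableEq α] {t : List α} (h : t ≠ []) : pvBord t < t.length := by
  have h1 : pvBord t ≤ t.length - 1 := Nat.findGreatest_le _
  have h2 : 0 < t.length := List.length_pos_iff.mpr h
  omega

theorem pvSP_bord {α : Type} [DecidableEq α] (t : List α) : pvSP t (pvBord t) :=
  Nat.findGreatest_spec (Nat.zero_le _) (pvSP_zero t)

theorem pvBord_ge {α : Type} [DecidableEq α] {t : List α} {k : Nat} (hk : pvSP t k)
    (h : k < t.length) : k ≤ pvBord t :=
  Nat.le_findGreatest (by omega) hk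

-- nesting: inside a border, smaller self-overlaps coincide with those of the whole
theorem pvSP_take {α : Type} [DecidableEq α] {t : List α} {j k : Nat} (hk : k ≤ t.length)
    (hjk : j ≤ k) (hPk : pvSP t k) : (pvSP t j ↔ pvSP (t.take k) j) := by
  unfold pvSP at *
  have hlen : (t.take k).length = k := by simp; omega
  rw [hlen, List.take_take, min_eq_left hjk, ← hPk, List.drop_drop]
  have h5 : t.length - k + (k - j) = t.length - j := by omega
  rw [h5]

-- extension: borders of t ++ [x] of positive length
theorem pvSP_append_iff {α : Type} [DecidableEq α] {t : List α} {x : α} {j : Nat}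
    (hj : j < t.length) : pvSP (t ++ [x]) (j + 1) ↔ (pvSP t j ∧ t.getD j x = x) := by
  unfold pvSP
  have h1 : (t ++ [x]).length - (j + 1) = t.length - j := by simp
  rw [h1]
  have h2 : (t ++ [x]).drop (t.length - j) = t.drop (t.length - j) ++ [x] :=
    List.drop_append_of_le_length (by omega)
  have h3 : (t ++ [x]).take (j + 1) = t.take (j + 1) :=
    List.take_append_of_le_length (by omega)
  have h4 : t.take (j + 1) = t.take j ++ [t[j]] := by
    rw [List.take_add_one]
    simp [List.getElem?_eq_getElem hj]
  rw [h2, h3, h4, List.getD_eq_getElem t x hj]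
  constructor
  · intro h
    have hl : (t.drop (t.length - j)).length = j := by simp; omega
    have h6 := List.append_inj h (by simp [hl]; omega)
    exact ⟨h6.1, by simpa using h6.2.symm⟩
  · rintro ⟨h5, h6⟩; rw [h5, h6]

theorem kmpWhile_spec (s : List (Option String)) (pi : List Nat) (c : Option String) (i : Nat)
    (hi : i ≤ s.length) (hpi : ∀ j, j < i → pi.getD j 0 = pvBord (s.take (j + 1))) :
    ∀ k, k < i → pvSP (s.take i) k →
      kmpWhile s pi c k ≤ k ∧ pvSP (s.take i) (kmpWhile s pi c k) ∧
      (0 < kmpWhile s pi c k → s.getD (kmpWhile s pi c k) none = c) ∧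
      (∀ j, j ≤ k → pvSP (s.take i) j → s.getD j none = c → j ≤ kmpWhile s pi c k) := by
  intro k
  induction k using Nat.strong_induction_on with
  | _ k IH =>
    intro hki hSP
    rw [kmpWhile]
    by_cases hcond : 0 < k ∧ c ≠ s.getD k none
    · have hk1 : k - 1 < i := by omega
      have hpik : pi.getD (k - 1) 0 = pvBord (s.take k) := by
        have h := hpi (k - 1) hk1
        rwa [Nat.sub_add_cancel hcond.1] at h
      have hlen_ti : (s.take i).length = i := by simp; omega
      have hlk : (s.take k).length = k := by simp; omega
      have htk : s.take k = (s.take i).take k := by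
        rw [List.take_take, min_eq_left (le_of_lt hki)]
      have htk_ne : s.take k ≠ [] := by
        intro h; rw [h] at hlk; simp at hlk; omega
      have hb_lt : pvBord (s.take k) < k := by
        have h := pvBord_lt htk_ne; omega
      rw [if_pos hcond]
      simp only [hpik]
      rw [dif_pos hb_lt]
      set k' := pvBord (s.take k) with hk'def
      have hSPk' : pvSP (s.take i) k' := by
        have h1 : pvSP ((s.take i).take k) k' := htk ▸ pvSP_bord (s.take k)
        exact (pvSP_take (by omega) (le_of_lt hb_lt) hSP).mpr h1
      obtain ⟨ih1, ih2, ih3, ih4⟩ := IH k' hb_lt (by omega) hSPk'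
      refine ⟨by omega, ih2, ih3, ?_⟩
      intro j hjk hj hjc
      by_cases hjk' : j ≤ k'
      · exact ih4 j hjk' hj hjc
      · exfalso
        have hjltk : j < k := by
          by_contra hcon
          have hjeq : j = k := by omega
          rw [hjeq] at hjc
          exact hcond.2 hjc.symm
        have h2 : pvSP (s.take k) j := by
          rw [htk]
          exact (pvSP_take (by omega) (le_of_lt hjltk) hSP).mp hj
        have h3 : j ≤ pvBord (s.take k) := pvBord_ge h2 (by omega)
        omega
    · rw [if_neg hcond]
      rw [not_and_or, not_not, Nat.not_lt, Nat.le_zero] at hcond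
      refine ⟨le_refl _, hSP, fun h0 => (hcond.resolve_left (by omega)).symm, fun j hj _ _ => hj⟩

theorem kmpStep_bord (s : List (Option String)) (pi : List Nat) (i : Nat) (h1 : 1 ≤ i)
    (hi : i < s.length) (hpi : ∀ j, j < i → pi.getD j 0 = pvBord (s.take (j + 1))) :
    (kmpStep s (pi, pvBord (s.take i)) i).2 = pvBord (s.take (i + 1)) := by
  have hlen_t : (s.take i).length = i := by simp; omega
  have ht_ne : s.take i ≠ [] := by
    intro h; rw [h] at hlen_t; simp at hlen_t; omega
  have hbord : pvBord (s.take i) < i := by have := pvBord_lt ht_ne; omega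
  obtain ⟨w1, w2, w3, w4⟩ :=
    kmpWhile_spec s pi (s.getD i none) i (le_of_lt hi) hpi (pvBord (s.take i)) hbord
      (pvSP_bord (s.take i))
  simp only [kmpStep]
  set c := s.getD i none with hc
  set r := kmpWhile s pi c (pvBord (s.take i)) with hr
  have hri : r < i := by omega
  have hcelem : c = s[i] := List.getD_eq_getElem s none hi
  have hsucc : s.take (i + 1) = s.take i ++ [s[i]] := by
    rw [List.take_add_one]; simp [List.getElem?_eq_getElem hi]
  have hlen_succ : (s.take (i + 1)).length = i + 1 := by simp; omega
  have hgetr : ∀ j, j < i → s.getD j none = (s.take i).getD j s[i] := by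
    intro j hj
    rw [List.getD_eq_getElem s none (by omega), List.getD_eq_getElem _ _ (by omega)]
    simp [List.getElem_take]
  by_cases hmatch : c = s.getD r none
  · rw [if_pos hmatch]
    have hSPr1 : pvSP (s.take (i + 1)) (r + 1) := by
      rw [hsucc]
      refine (pvSP_append_iff (by omega)).mpr ⟨w2, ?_⟩
      rw [← hgetr r hri, ← hmatch, hcelem]
    have hle : r + 1 ≤ pvBord (s.take (i + 1)) := pvBord_ge hSPr1 (by omega)
    have hge : pvBord (s.take (i + 1)) ≤ r + 1 := by
      set B := pvBord (s.take (i + 1)) with hB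
      have hne2 : s.take (i+1) ≠ [] := by intro h; rw [h] at hlen_succ; simp at hlen_succ
      have hBlt : B < i + 1 := by have := pvBord_lt hne2; omega
      rcases Nat.eq_zero_or_pos B with h0 | hpos
      · omega
      · obtain ⟨j, hj⟩ : ∃ j, B = j + 1 := ⟨B - 1, by omega⟩
        have hSPB : pvSP (s.take (i + 1)) B := pvSP_bord _
        rw [hj, hsucc] at hSPB
        obtain ⟨hsp, hget⟩ := (pvSP_append_iff (by omega)).mp hSPB
        have hjr : j ≤ r := by
          refine w4 j (pvBord_ge hsp (by omega)) hsp ?_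
          rw [hgetr j (by omega), hget, ← hcelem]
        omega
    omega
  · rw [if_neg hmatch]
    have hr0 : r = 0 := by
      by_contra h
      exact hmatch (w3 (by omega)).symm
    have hne2 : s.take (i+1) ≠ [] := by intro h; rw [h] at hlen_succ; simp at hlen_succ
    have hBlt : pvBord (s.take (i + 1)) < i + 1 := by have := pvBord_lt hne2; omega
    rcases Nat.eq_zero_or_pos (pvBord (s.take (i + 1))) with h0 | hpos
    · omega
    · exfalso
      obtain ⟨j, hj⟩ : ∃ j, pvBord (s.take (i + 1)) = j + 1 := ⟨pvBord (s.take (i + 1)) - 1, by omega⟩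
      have hSPB : pvSP (s.take (i + 1)) (j + 1) := hj ▸ pvSP_bord _
      rw [hsucc] at hSPB
      obtain ⟨hsp, hget⟩ := (pvSP_append_iff (by omega)).mp hSPB
      have hjr : j ≤ r := by
        refine w4 j (pvBord_ge hsp (by omega)) hsp ?_
        rw [hgetr j (by omega), hget, ← hcelem]
      rw [hr0] at hjr
      have hj0 : j = 0 := by omega
      rw [hj0] at hget
      apply hmatch
      rw [hr0, hgetr 0 (by omega), hget, ← hcelem]

theorem kmpFold_inv (s : List (Option String)) (hs : s ≠ []) :
    ∀ m, m ≤ s.length - 1 →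
      ((List.range' 1 m).foldl (kmpStep s) (List.replicate s.length 0, 0)).1.length = s.length ∧
      (∀ j, j ≤ m →
        ((List.range' 1 m).foldl (kmpStep s) (List.replicate s.length 0, 0)).1.getD j 0 =
          pvBord (s.take (j + 1))) ∧
      ((List.range' 1 m).foldl (kmpStep s) (List.replicate s.length 0, 0)).2 =
        pvBord (s.take (m + 1)) := by
  have hlpos : 0 < s.length := List.length_pos_iff.mpr hs
  have hbord1 : pvBord (s.take 1) = 0 := by
    have hl1 : (s.take 1).length = 1 := by simp; omega
    unfold pvBord
    simp [hl1]
  intro m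
  induction m with
  | zero =>
    intro _
    refine ⟨by simp, ?_, by simpa using hbord1.symm⟩
    intro j hj
    have hj0 : j = 0 := by omega
    subst hj0
    simpa using hbord1.symm
  | succ m ih =>
    intro hm
    obtain ⟨ih1, ih2, ih3⟩ := ih (by omega)
    rw [List.range'_concat, List.foldl_append]
    set prev := (List.range' 1 m).foldl (kmpStep s) (List.replicate s.length 0, 0) with hprev
    simp only [List.foldl_cons, List.foldl_nil]
    rw [show 1 + 1 * m = m + 1 by omega]
    have hpe : (prev.1, pvBord (s.take (m + 1))) = prev := by rw [← ih3]
    have hkey : (kmpStep s prev (m + 1)).2 = pvBord (s.take (m + 1 + 1)) := by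
      rw [← hpe]
      exact kmpStep_bord s prev.1 (m + 1) (by omega) (by omega) (fun j hj => ih2 j (by omega))
    have hfst : (kmpStep s prev (m + 1)).1 = prev.1.set (m + 1) (kmpStep s prev (m + 1)).2 := rfl
    refine ⟨?_, ?_, hkey⟩
    · rw [hfst, List.length_set, ih1]
    · intro j hj
      rw [hfst]
      by_cases hjm : j = m + 1
      · subst hjm
        have hlt : m + 1 < prev.1.length := by rw [ih1]; omega
        rw [List.getD_eq_getElem _ _ (by simpa using hlt), List.getElem_set_self]
        exact hkey
      · rw [List.getD_eq_getElem?_getD, List.getElem?_set_ne (by omega), ← List.getD_eq_getElem?_getD]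
        exact ih2 j (by omega)

-- the sentinel collapses the border of cur+[None]+prev to the prev/cur overlap
theorem bord_sentinel (p c : List String) :
    pvBord (c.map some ++ none :: p.map some) = pvOvK p c := by
  set s : List (Option String) := c.map some ++ none :: p.map some with hs
  have hn : s.length = c.length + 1 + p.length := by simp [hs]; omega
  have hs_ne : s ≠ [] := by simp [hs]
  have hsent : s[c.length]? = some none := by
    rw [hs, List.getElem?_append_right (by simp)]
    simp
  have hnone : ∀ j, s[j]? = some none → j = c.length := by
    intro j hj
    by_cases h1 : j < c.length
    · exfalso
      rw [hs, List.getElem?_append_left (by simpa using h1), List.getElem?_map,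
        List.getElem?_eq_getElem h1] at hj
      simp at hj
    · by_cases h2 : j = c.length
      · exact h2
      · exfalso
        have h3 : c.length < j := by omega
        rw [hs, List.getElem?_append_right (by simp; omega)] at hj
        have h5 : j - (c.map some).length = j - c.length := by simp
        rw [h5, show j - c.length = (j - c.length - 1) + 1 by omega,
          List.getElem?_cons_succ, List.getElem?_map] at hj
        cases hp5 : p[j - c.length - 1]? with
        | none => rw [hp5] at hj; simp at hj
        | some v => rw [hp5] at hj; simp at hj
  have htake : ∀ K, K ≤ c.length → s.take K = (c.take K).map some := by
    intro K hK
    rw [hs, List.take_append_of_le_length (by simpa using hK), List.map_take]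
  have hdrop : ∀ K, K ≤ p.length → s.drop (s.length - K) = (p.drop (p.length - K)).map some := by
    intro K hK
    rw [hs]
    have h6 : (c.map some ++ none :: p.map some).length - K
        = (c.map some).length + (1 + (p.length - K)) := by simp; omega
    rw [h6, List.drop_append,
      show (List.map some c).length + (1 + (p.length - K)) - (List.map some c).length
        = (p.length - K) + 1 by omega,
      List.drop_succ_cons, List.map_drop,
      List.drop_eq_nil_of_le (by omega : (List.map some c).length ≤ (List.map some c).length + (1 + (p.length - K)))]
    simp
  set K := pvBord s with hK
  have hKlt : K < s.length := pvBord_lt hs_ne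
  have hSP : s.drop (s.length - K) = s.take K := pvSP_bord s
  have hidx : ∀ j, j < K → s[s.length - K + j]? = s[j]? := by
    intro j hjK
    have h7 := congrArg (fun l => l[j]?) hSP
    simp only at h7
    rw [List.getElem?_drop, List.getElem?_take_of_lt hjK] at h7
    exact h7
  have hK1 : K ≤ c.length := by
    by_contra hcon
    have h1 : s[s.length - K + c.length]? = s[c.length]? := hidx c.length (by omega)
    rw [hsent] at h1
    have h2 := hnone _ h1
    omega
  have hK2 : K ≤ p.length := by
    by_contra hcon
    have hle : s.length - K ≤ c.length := by omega
    set j0 := c.length - (s.length - K) with hj0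
    have hj0K : j0 < K := by omega
    have h1 : s[s.length - K + j0]? = s[j0]? := hidx j0 hj0K
    have h2 : s.length - K + j0 = c.length := by omega
    rw [h2, hsent] at h1
    have h3 := hnone _ h1.symm
    omega
  have hOvK : pvOv p c K := by
    have h8 := hSP
    rw [htake K hK1, hdrop K hK2] at h8
    exact List.map_injective_iff.mpr (Option.some_injective _) h8
  have hle1 : K ≤ pvOvK p c := Nat.le_findGreatest (by omega) hOvK
  have hle2 : pvOvK p c ≤ K := by
    have hM : pvOv p c (pvOvK p c) := Nat.findGreatest_spec (Nat.zero_le _) (pvOv_zero p c)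
    have hMle : pvOvK p c ≤ min p.length c.length := Nat.findGreatest_le _
    have hMSP : pvSP s (pvOvK p c) := by
      unfold pvSP
      rw [htake _ (by omega), hdrop _ (by omega)]
      exact congrArg (List.map some) hM
    exact pvBord_ge hMSP (by omega)
  omega

theorem aLoopA_eq (p c : List String) (cur : List (List (String × String))) (n : Nat) :
    aLoopA p c cur (PySem.List.pyRange (n : Int) 0 (-1)) =
      if Nat.findGreatest (pvOv p c) n = 0 then none
      else some (cur.drop (Nat.findGreatest (pvOv p c) n)) := by
  induction n with
  | zero =>
    rw [PySem.List.pyRange_neg_one_eq_nil (by norm_num)]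
    simp [aLoopA]
  | succ n ih =>
    rw [PySem.List.pyRange_neg_one_cons (by exact_mod_cast Nat.succ_pos n)]
    have hc1 : ((n + 1 : Nat) : Int) - 1 = (n : Int) := by push_cast; ring
    rw [hc1]
    simp only [aLoopA]
    rw [PySem.List.slice_from_neg_natCast p (n + 1) (Nat.succ_pos n),
      PySem.List.slice_to_natCast, PySem.List.slice_from_natCast, ih,
      Nat.findGreatest_succ]
    by_cases hP : pvOv p c (n + 1)
    · rw [if_pos hP, if_pos hP]
      simp
    · rw [if_neg hP, if_neg hP]

theorem A_eq (previous current : List (List (String × String))) (hc : current ≠ []) :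
    pane_runtime_new_events_py previous current =
      current.drop (pvOvK (previous.map pvId) (current.map pvId)) := by
  simp only [pane_runtime_new_events_py]
  rw [if_neg hc]
  rw [aLoopA_eq]
  have hcne : current.map pvId ≠ [] := fun h => hc (List.map_eq_nil_iff.mp h)
  by_cases h0 : Nat.findGreatest (pvOv (previous.map pvId) (current.map pvId))
      (min (previous.map pvId).length (current.map pvId).length) = 0
  · rw [if_pos h0]
    have hne : previous.map pvId ≠ current.map pvId := by
      intro heq
      have hL : 0 < (current.map pvId).length := List.length_pos_iff.mpr hcne
      have hOv : pvOv (previous.map pvId) (current.map pvId) (current.map pvId).length := by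
        unfold pvOv
        rw [heq]
        simp
      have hle : (current.map pvId).length ≤
          Nat.findGreatest (pvOv (previous.map pvId) (current.map pvId))
            (min (previous.map pvId).length (current.map pvId).length) :=
        Nat.le_findGreatest (by rw [heq]; omega) hOv
      omega
    rw [if_neg hne]
    unfold pvOvK
    rw [h0, List.drop_zero]
  · rw [if_neg h0]
    unfold pvOvK
    rfl

theorem B_eq (previous current : List (List (String × String))) (hc : current ≠ []) :
    pane_runtime_new_events_py_alt previous current =
      current.drop (pvOvK (previous.map pvId) (current.map pvId)) := by
  simp only [pane_runtime_new_events_py_alt]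
  rw [if_neg hc]
  by_cases hp : previous.map pvId = []
  · rw [if_pos hp, hp]
    have h : pvOvK ([] : List String) (current.map pvId) = 0 := by
      simp [pvOvK]
    rw [h, List.drop_zero]
  · rw [if_neg hp]
    set pids := previous.map pvId with hpids
    set cids := current.map pvId with hcids
    set s : List (Option String) := cids.map some ++ [none] ++ pids.map some with hsdef
    have hs2 : s = cids.map some ++ none :: pids.map some := by simp [hsdef]
    have hs_ne : s ≠ [] := by rw [hs2]; simp
    have hlen : 0 < s.length := List.length_pos_iff.mpr hs_ne
    obtain ⟨f1, f2, f3⟩ := kmpFold_inv s hs_ne (s.length - 1) (le_refl _)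
    rw [PySem.List.slice_from_natCast, f3, show s.length - 1 + 1 = s.length by omega,
      List.take_length, hs2, bord_sentinel]

-- ===== VERDICT (by name: the statement is the Claim_ definition above) =====
theorem pane_runtime_new_events_py_spec : Claim_equal_pane_runtime_new_events_py := by
  intro previous current _
  unfold Spec_pane_runtime_new_events_py
  by_cases hc : current = []
  · subst hc
    simp [pane_runtime_new_events_py, pane_runtime_new_events_py_alt]
  · rw [A_eq previous current hc, B_eq previous current hc]
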